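-- pv_equiv track=rewrite | github.com/Haaaam/PS | Programmers/Level1/둘만의_암.py | solution
-- ===== SOURCE A (Python) =====
-- def solution(s,skip,index):
--
--     #alphabet = ["a", "b", "c", "d", "e", "f", "g", "h", "i", "j", "k", "l", "m", "n", "o", "p", "q", "r", "s", "t", "u",
--      #           "v", "w", "x", "y", "z"]
--     answer = ''
--     for i in s:
--         a = ord(i)
--         b = index
--         while b > 0:
--             a += 1
--             if a > ord('z'):
--                 a = ord('a')
--             if chr(a) in skip:
--                 b += 1
--
--             b -= 1
--
--         answer += chr(a)
--     return answer
-- ===== SOURCE B (Python) =====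
-- def solution(s, skip, index):
--     skipset = set(skip)
--     valid = [k for k in range(97, 123) if chr(k) not in skipset]
--     out = []
--     for ch in s:
--         if index <= 0:
--             out.append(ch)
--             continue
--         a = ord(ch)
--         pref = [k for k in range(a + 1, 123) if chr(k) not in skipset]
--         if index <= len(pref):
--             out.append(chr(pref[index - 1]))
--         else:
--             out.append(chr(valid[(index - len(pref) - 1) % len(valid)]))
--     return ''.join(out)
-- ===== Notes on version B (the rewrite author's own statement) =====
-- stated objective: faster
-- what changed: A steps the while loop index times per character (skipped letters re-incrementing the budget); B precomputes the reduced alphabet once and, per character, counts the unskipped codes up to 'z' and otherwise picks the answer by one modular index into the reduced alphabet.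
import Mathlib
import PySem

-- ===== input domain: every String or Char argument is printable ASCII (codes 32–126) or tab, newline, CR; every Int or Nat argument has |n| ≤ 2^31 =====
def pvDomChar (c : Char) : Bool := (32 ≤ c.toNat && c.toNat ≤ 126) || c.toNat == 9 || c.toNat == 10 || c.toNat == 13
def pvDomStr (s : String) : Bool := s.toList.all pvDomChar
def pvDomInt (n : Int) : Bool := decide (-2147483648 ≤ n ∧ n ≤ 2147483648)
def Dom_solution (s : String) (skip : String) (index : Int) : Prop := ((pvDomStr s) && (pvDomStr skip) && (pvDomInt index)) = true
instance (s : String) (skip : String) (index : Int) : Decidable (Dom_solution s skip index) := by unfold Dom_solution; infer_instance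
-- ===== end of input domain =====

-- B replaces A's per-character while loop (index iterations each) by a precomputed
-- reduced alphabet and O(1) modular indexing per character: objective "faster".

-- ===== PORT A =====
-- the while loop of A, with fuel (the Python loop is unbounded; fuel only makes it
-- total — Pre_solution guarantees the fuel supplied is never exhausted)
def pvLoopA (skip : List Char) : Nat → Nat → Int → Nat
  | 0, a, _ => a
  | f + 1, a, b =>
    if b > 0 then
      let a1 := a + 1
      let a2 := if a1 > 122 then 97 else a1
      let b2 := (if Char.ofNat a2 ∈ skip then b + 1 else b) - 1
      pvLoopA skip f a2 b2
    else a

def pvFuel (index : Int) : Nat := 123 + 26 * index.toNat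

def solution (s : String) (skip : String) (index : Int) : String :=
  String.mk (s.toList.foldl
    (fun answer i => answer ++ [Char.ofNat (pvLoopA skip.toList (pvFuel index) i.toNat index)]) [])

-- ===== PORT B =====
-- valid = [k for k in range(97,123) if chr(k) not in skip]
def pvValid (skip : List Char) : List Nat :=
  (List.range' 97 26).filter (fun k => decide (Char.ofNat k ∉ skip))

-- pref = [k for k in range(a+1,123) if chr(k) not in skip]
def pvPref (skip : List Char) (a : Nat) : List Nat :=
  (List.range' (a + 1) (123 - (a + 1))).filter (fun k => decide (Char.ofNat k ∉ skip))

def pvAltChar (skip : List Char) (index : Int) (ch : Char) : Char :=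
  if index ≤ 0 then ch
  else
    let P := pvPref skip ch.toNat
    if index ≤ (P.length : Int) then Char.ofNat (P.getD (index - 1).toNat 0)
    else
      let v := pvValid skip
      Char.ofNat (v.getD ((index - (P.length : Int) - 1) % (v.length : Int)).toNat 0)

def solution_alt (s : String) (skip : String) (index : Int) : String :=
  String.mk (s.toList.map (pvAltChar skip.toList index))

-- ===== PRECONDITION & SPEC =====
-- Pre_ excludes exactly the inputs on which A's while loop never terminates: index > 0,
-- every lowercase letter occurs in skip, and some character of s has too few
-- unskipped codes between it and 'z'.  A returns no value there (it diverges).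
def Pre_solution (s : String) (skip : String) (index : Int) : Prop :=
  index ≤ 0
  ∨ (∃ k ∈ List.range' 97 26, Char.ofNat k ∉ skip.toList)
  ∨ (∀ c ∈ s.toList,
      index ≤ (((List.range' (c.toNat + 1) (123 - (c.toNat + 1))).filter
                  (fun k => decide (Char.ofNat k ∉ skip.toList))).length : Int))
instance (s : String) (skip : String) (index : Int) : Decidable (Pre_solution s skip index) := by
  unfold Pre_solution; infer_instance

def pvWitness_solution : String × String × Int := ("ab", "c", 1)

def Spec_solution (s : String) (skip : String) (index : Int) (out : String) : Prop :=
  out = solution_alt s skip index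
instance (s : String) (skip : String) (index : Int) (out : String) : Decidable (Spec_solution s skip index out) := by
  unfold Spec_solution; infer_instance

-- ===== CLAIM (what is proved, stated in full; the proofs are below) =====
def Claim_equal_solution : Prop := ∀ (s : String) (skip : String) (index : Int),
  Dom_solution s skip index → Pre_solution s skip index →
  Spec_solution s skip index (solution s skip index)

-- ===== LEMMAS AND PROOFS =====

-- the cycle of lowercase codes, and n copies of a list
def pvCyc : List Nat := List.range' 97 26

def pvRep (v : List Nat) : Nat → List Nat
  | 0 => []
  | n + 1 => v ++ pvRep v n

-- the sequence of codes A's loop visits, starting after a, allowing n full cycles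
def pvPath (a n : Nat) : List Nat := List.range' (a + 1) (123 - (a + 1)) ++ pvRep pvCyc n

-- A's loop replayed along an explicit list of codes
def pvWalk (skip : List Char) : List Nat → Int → Nat → Nat
  | [], _, a => a
  | c :: cs, b, a => if b > 0 then pvWalk skip cs (if Char.ofNat c ∈ skip then b else b - 1) c else a

theorem pvLoopA_nonpos (skip : List Char) (f : Nat) (a : Nat) (b : Int) (hb : b ≤ 0) :
    pvLoopA skip f a b = a := by
  cases f
  · rfl
  · simp [pvLoopA]; omega

theorem pvWalk_nonpos (skip : List Char) (xs : List Nat) (b : Int) (a : Nat) (hb : b ≤ 0) :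
    pvWalk skip xs b a = a := by
  cases xs
  · rfl
  · simp [pvWalk]; omega

theorem pvPath_cons_lt (a n : Nat) (h : a < 122) :
    pvPath a n = (a + 1) :: pvPath (a + 1) n := by
  unfold pvPath
  have h1 : 123 - (a + 1) = (123 - (a + 2)) + 1 := by omega
  rw [h1, List.range'_succ]
  simp

theorem pvPath_cons_ge (a n : Nat) (h : 122 ≤ a) :
    pvPath a (n + 1) = 97 :: pvPath 97 n := by
  unfold pvPath
  have h1 : 123 - (a + 1) = 0 := by omega
  rw [h1]
  show pvRep pvCyc (n + 1) = _
  have hc : pvCyc = 97 :: List.range' 98 25 := by decide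
  simp [pvRep, hc]

def pvCnt (skip : List Char) (xs : List Nat) : Nat :=
  (xs.filter (fun k => decide (Char.ofNat k ∉ skip))).length

theorem pvLoopA_eq_walk (skip : List Char) :
    ∀ (fuel : Nat) (a n : Nat) (b : Int),
      b ≤ (pvCnt skip (pvPath a n) : Int) → (pvPath a n).length ≤ fuel →
      pvLoopA skip fuel a b = pvWalk skip (pvPath a n) b a := by
  intro fuel
  induction fuel with
  | zero =>
    intro a n b _ hlen
    have : pvPath a n = [] := List.eq_nil_of_length_eq_zero (by omega)
    rw [this, pvWalk, pvLoopA]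
  | succ f ih =>
    intro a n b hcnt hlen
    by_cases hb : b > 0
    · -- the path is nonempty: its head is the next code
      have hshape : ∃ n', pvPath a n = (if a + 1 > 122 then 97 else a + 1) :: pvPath (if a + 1 > 122 then 97 else a + 1) n' ∧ (n' ≤ n) := by
        by_cases ha : a < 122
        · exact ⟨n, by rw [if_neg (by omega), pvPath_cons_lt a n ha], le_refl n⟩
        · cases n with
          | zero =>
            exfalso
            have : pvPath a 0 = [] := by
              unfold pvPath
              have : 123 - (a + 1) = 0 := by omega
              simp [this, pvRep]
            rw [this] at hcnt
            simp [pvCnt] at hcnt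
            omega
          | succ n' =>
            exact ⟨n', by rw [if_pos (by omega), pvPath_cons_ge a n' (by omega)], by omega⟩
      obtain ⟨n', hpath, _⟩ := hshape
      set a2 := if a + 1 > 122 then 97 else a + 1 with ha2
      rw [hpath]
      rw [pvWalk, if_pos hb]
      rw [pvLoopA, if_pos hb]
      simp only []
      have hb2 : (if Char.ofNat a2 ∈ skip then b + 1 else b) - 1
               = (if Char.ofNat a2 ∈ skip then b else b - 1) := by
        by_cases hm : Char.ofNat a2 ∈ skip <;> simp [hm]
      rw [hb2]
      have hcnt' : pvCnt skip ((a2 :: pvPath a2 n')) = pvCnt skip (pvPath a2 n') + (if Char.ofNat a2 ∈ skip then 0 else 1) := by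
        by_cases hm : Char.ofNat a2 ∈ skip <;> simp [pvCnt, List.filter, hm]
      rw [hpath] at hcnt hlen
      apply ih a2 n'
      · by_cases hm : Char.ofNat a2 ∈ skip <;> rw [hcnt'] at hcnt <;> simp [hm] at hcnt ⊢ <;> omega
      · simp at hlen; omega
    · rw [pvLoopA_nonpos skip _ a b (by omega), pvWalk_nonpos skip _ b a (by omega)]

theorem pvWalk_closed (skip : List Char) :
    ∀ (xs : List Nat) (b : Int) (a : Nat),
      1 ≤ b → b ≤ (pvCnt skip xs : Int) →
      pvWalk skip xs b a = (xs.filter (fun k => decide (Char.ofNat k ∉ skip))).getD (b - 1).toNat 0 := by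
  intro xs
  induction xs with
  | nil => intro b a hb hcnt; simp [pvCnt] at hcnt; omega
  | cons c cs ih =>
    intro b a hb hcnt
    rw [pvWalk, if_pos (by omega)]
    by_cases hm : Char.ofNat c ∈ skip
    · rw [if_pos hm]
      have : pvCnt skip (c :: cs) = pvCnt skip cs := by simp [pvCnt, List.filter, hm]
      rw [this] at hcnt
      rw [ih b c hb hcnt]
      simp [List.filter, hm]
    · rw [if_neg hm]
      have hfil : (c :: cs).filter (fun k => decide (Char.ofNat k ∉ skip))
                = c :: cs.filter (fun k => decide (Char.ofNat k ∉ skip)) := by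
        simp [List.filter, hm]
      by_cases hb1 : b = 1
      · subst hb1
        rw [pvWalk_nonpos skip cs _ c (by omega), hfil]
        simp
      · have hcnt' : pvCnt skip (c :: cs) = pvCnt skip cs + 1 := by simp [pvCnt, List.filter, hm]
        rw [ih (b - 1) c (by omega) (by omega)]
        rw [hfil]
        have : (b - 1).toNat = (b - 2).toNat + 1 := by omega
        rw [this, List.getD_cons_succ]
        congr 1
        omega

theorem pvRep_filter (p : Nat → Bool) (v : List Nat) :
    ∀ n, (pvRep v n).filter p = pvRep (v.filter p) n := by
  intro n
  induction n with
  | zero => simp [pvRep]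
  | succ n ih => simp [pvRep, List.filter_append, ih]

theorem pvRep_length (v : List Nat) : ∀ n, (pvRep v n).length = n * v.length := by
  intro n
  induction n with
  | zero => simp [pvRep]
  | succ n ih => simp [pvRep, ih]; ring

theorem pvRep_getD (v : List Nat) (_hm : 0 < v.length) :
    ∀ (n i : Nat), i < n * v.length → (pvRep v n).getD i 0 = v.getD (i % v.length) 0 := by
  intro n
  induction n with
  | zero => intro i hi; omega
  | succ n ih =>
    intro i hi
    have hexp : (n + 1) * v.length = v.length + n * v.length := by ring
    by_cases hlt : i < v.length
    · rw [pvRep]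
      rw [List.getD_append _ _ _ _ hlt, Nat.mod_eq_of_lt hlt]
    · rw [pvRep]
      have h1 : i = v.length + (i - v.length) := by omega
      rw [List.getD_eq_getElem?_getD, List.getElem?_append_right (by omega), ← List.getD_eq_getElem?_getD]
      rw [ih (i - v.length) (by omega)]
      have hmod : i % v.length = (i - v.length) % v.length := by
        conv_lhs => rw [h1]
        exact Nat.add_mod_left _ _
      rw [hmod]

theorem pvPath_filter (skip : List Char) (a n : Nat) :
    (pvPath a n).filter (fun k => decide (Char.ofNat k ∉ skip))
      = pvPref skip a ++ pvRep (pvValid skip) n := by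
  unfold pvPath pvPref pvValid pvCyc
  rw [List.filter_append, pvRep_filter]

theorem pvCnt_path (skip : List Char) (a n : Nat) :
    pvCnt skip (pvPath a n) = (pvPref skip a).length + n * (pvValid skip).length := by
  unfold pvCnt
  rw [pvPath_filter, List.length_append, pvRep_length]

theorem pvPath_length (a n : Nat) : (pvPath a n).length = (123 - (a + 1)) + n * 26 := by
  unfold pvPath
  rw [List.length_append, pvRep_length]
  simp [pvCyc]

-- per-character equality of the two ports
theorem pvChar_eq (skip : List Char) (index : Int) (c : Char)
    (h : index ≤ 0 ∨ 0 < (pvValid skip).length ∨ index ≤ ((pvPref skip c.toNat).length : Int)) :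
    Char.ofNat (pvLoopA skip (pvFuel index) c.toNat index) = pvAltChar skip index c := by
  by_cases h0 : index ≤ 0
  · rw [pvLoopA_nonpos skip _ _ _ h0, pvAltChar, if_pos h0, Char.ofNat_toNat]
  · have h1 : 1 ≤ index := by omega
    set a := c.toNat with ha
    set n := index.toNat with hn
    have hni : (n : Int) = index := by omega
    set P := pvPref skip a with hP
    set v := pvValid skip with hv
    have hcnt : index ≤ (pvCnt skip (pvPath a n) : Int) := by
      rw [pvCnt_path, ← hP, ← hv]
      rcases h with h | h | h
      · omega
      · have : n ≤ n * v.length := Nat.le_mul_of_pos_right n h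
        push_cast
        omega
      · have hnn : (0 : Int) ≤ (n : Int) * (v.length : Int) := by positivity
        push_cast
        omega
    have hlen : (pvPath a n).length ≤ pvFuel index := by
      rw [pvPath_length, pvFuel]
      omega
    rw [pvLoopA_eq_walk skip (pvFuel index) a n index hcnt hlen]
    rw [pvWalk_closed skip _ index a h1 hcnt]
    rw [pvPath_filter]
    rw [pvAltChar, if_neg h0]
    simp only [← hP, ← hv]
    by_cases hle : index ≤ (P.length : Int)
    · rw [if_pos hle]
      congr 1
      rw [List.getD_eq_getElem?_getD, List.getElem?_append_left (by omega), ← List.getD_eq_getElem?_getD]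
    · rw [if_neg hle]
      have hm : 0 < v.length := by
        rcases h with h | h | h
        · omega
        · exact h
        · omega
      congr 1
      have hsplit : (index - 1).toNat = P.length + (index - (P.length : Int) - 1).toNat := by omega
      rw [List.getD_eq_getElem?_getD, hsplit, List.getElem?_append_right (by omega), ← List.getD_eq_getElem?_getD]
      have : P.length + (index - (P.length : Int) - 1).toNat - P.length = (index - (P.length : Int) - 1).toNat := by omega
      rw [this]
      set i := (index - (P.length : Int) - 1).toNat with hi
      have hilt : i < n * v.length := by
        have : i ≤ n - 1 := by omega
        have : n ≤ n * v.length := Nat.le_mul_of_pos_right n hm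
        omega
      rw [pvRep_getD v hm n i hilt]
      congr 1
      have hcast : (index - (P.length : Int) - 1) = (i : Int) := by omega
      rw [hcast]
      rw [← Int.natCast_emod, Int.toNat_natCast]

-- ===== VERDICT (by name: the statement is the Claim_ definition above) =====
theorem solution_spec : Claim_equal_solution := by
  intro s skip index _hdom hpre
  unfold Spec_solution solution solution_alt
  rw [PySem.List.foldl_append_singleton_eq_map]
  simp only [List.nil_append]
  congr 1
  apply List.map_congr_left
  intro c hc
  apply pvChar_eq
  rcases hpre with h | h | h
  · exact Or.inl h
  · refine Or.inr (Or.inl ?_)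
    obtain ⟨k, hk, hks⟩ := h
    have : k ∈ pvValid skip.toList := by
      unfold pvValid
      rw [List.mem_filter]
      exact ⟨hk, by simpa using hks⟩
    exact List.length_pos_of_mem this
  · exact Or.inr (Or.inr (h c hc))
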